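-- pv_equiv track=rewrite | github.com/moniankai/r0capture | scripts/decrypt_video.py | build_sample_offsets
-- ===== SOURCE A (Python) =====
-- def build_sample_offsets(
--     chunk_offsets: list[int],
--     stsc: list[tuple[int, int]],
--     sizes: list[int],
-- ) -> list[int]:
--     """Compute per-sample file offsets from stco + stsc + stsz."""
--     offsets = []
--     si = 0
--     for ci in range(len(chunk_offsets)):
--         chunk_num = ci + 1
--         spc = 1
--         for entry in stsc:
--             if entry[0] <= chunk_num:
--                 spc = entry[1]
--         offset = chunk_offsets[ci]
--         for _ in range(spc):
--             if si >= len(sizes):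
--                 break
--             offsets.append(offset)
--             offset += sizes[si]
--             si += 1
--     return offsets
-- ===== SOURCE B (Python) =====
-- def build_sample_offsets(
--     chunk_offsets: list[int],
--     stsc: list[tuple[int, int]],
--     sizes: list[int],
-- ) -> list[int]:
--     """Compute per-sample file offsets from stco + stsc + stsz.
--
--     One right-to-left pass compresses stsc into strictly increasing
--     breakpoints (last-entry-wins, first_chunk clamped to 1), then a single
--     forward pointer over those breakpoints replaces the per-chunk rescan.
--     """
--     # compress: keep an entry iff its clamped first_chunk is strictly below
--     # every clamped first_chunk kept so far (scanning from the right)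
--     bp = []
--     for f, s in reversed(stsc):
--         f1 = f if f >= 1 else 1
--         if not bp or f1 < bp[-1][0]:
--             bp.append((f1, s))
--     bp.reverse()  # strictly increasing first_chunk
--
--     offsets = []
--     si = 0
--     n = len(sizes)
--     p = 0
--     spc = 1
--     cn = 0
--     for offset in chunk_offsets:
--         if si >= n:
--             break
--         cn += 1
--         while p < len(bp) and bp[p][0] <= cn:
--             spc = bp[p][1]
--             p += 1
--         end = si + spc
--         if end > n:
--             end = n
--         while si < end:
--             offsets.append(offset)
--             offset += sizes[si]
--             si += 1
--     return offsets
-- ===== Notes on version B (the rewrite author's own statement) =====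
-- stated objective: faster
-- what changed: Instead of rescanning the whole stsc table for every chunk, B compresses stsc once (right to left, last-entry-wins, first_chunk clamped to 1) into a strictly increasing breakpoint list and sweeps a single forward pointer over it while walking the chunks.
import Mathlib
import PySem

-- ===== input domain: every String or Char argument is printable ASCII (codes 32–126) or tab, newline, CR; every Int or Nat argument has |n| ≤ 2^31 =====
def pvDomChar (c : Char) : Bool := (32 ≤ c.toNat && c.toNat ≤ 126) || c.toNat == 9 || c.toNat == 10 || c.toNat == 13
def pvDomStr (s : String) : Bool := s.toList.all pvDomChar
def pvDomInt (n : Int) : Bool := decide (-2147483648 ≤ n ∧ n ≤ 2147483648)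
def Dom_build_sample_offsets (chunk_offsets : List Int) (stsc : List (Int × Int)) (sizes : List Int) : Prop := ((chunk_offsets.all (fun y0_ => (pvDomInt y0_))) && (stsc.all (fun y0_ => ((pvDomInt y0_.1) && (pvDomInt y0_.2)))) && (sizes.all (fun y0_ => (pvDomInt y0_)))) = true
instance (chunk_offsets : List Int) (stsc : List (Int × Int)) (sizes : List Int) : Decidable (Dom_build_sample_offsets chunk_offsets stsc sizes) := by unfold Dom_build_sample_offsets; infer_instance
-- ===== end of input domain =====

-- B replaces A's per-chunk rescan of stsc by a one-pass compression of stsc into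
-- increasing breakpoints plus a forward pointer over them (alternative algorithm, same values).

-- ===== PORT A =====
-- A's inner `for entry in stsc` loop: spc = last entry value with entry[0] <= chunk_num, default 1
def pvSpcA (stsc : List (Int × Int)) (chunk_num : Int) : Int :=
  stsc.foldl (fun spc e => if e.1 ≤ chunk_num then e.2 else spc) 1

-- A's inner `for _ in range(spc)` loop with its `break` on si >= len(sizes)
def pvEmitA (sizes : List Int) : Nat → Int → Nat → List Int → List Int × Nat
  | 0, _, si, offsets => (offsets, si)
  | m + 1, offset, si, offsets =>
    if si < sizes.length then
      pvEmitA sizes m (offset + sizes.getD si 0) (si + 1) (offsets ++ [offset])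
    else (offsets, si)

-- one iteration of A's `for ci in range(len(chunk_offsets))` body
def pvStepA (chunk_offsets : List Int) (stsc : List (Int × Int)) (sizes : List Int)
    (st : List Int × Nat) (ci : Nat) : List Int × Nat :=
  let chunk_num : Int := (ci : Int) + 1
  let spc := pvSpcA stsc chunk_num
  pvEmitA sizes spc.toNat (chunk_offsets.getD ci 0) st.2 st.1

def build_sample_offsets (chunk_offsets : List Int) (stsc : List (Int × Int)) (sizes : List Int) : List Int :=
  ((List.range chunk_offsets.length).foldl (pvStepA chunk_offsets stsc sizes) ([], 0)).1

-- ===== PORT B =====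
-- B's `for f, s in reversed(stsc)` compression loop (minf = bp[-1][0], i.e. the last kept clamped first_chunk)
def pvDown : Option Int → List (Int × Int) → List (Int × Int)
  | _, [] => []
  | minf, e :: r =>
    let f1 : Int := if e.1 ≥ 1 then e.1 else 1
    match minf with
    | none => (f1, e.2) :: pvDown (some f1) r
    | some m => if f1 < m then (f1, e.2) :: pvDown (some f1) r else pvDown (some m) r

-- B's `while p < len(bp) and bp[p][0] <= cn` pointer loop; `rest` is bp[p:]
def pvAdvance : List (Int × Int) → Int → Int → List (Int × Int) × Int
  | [], spc, _ => ([], spc)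
  | (f, s) :: r, spc, cn => if f ≤ cn then pvAdvance r s cn else ((f, s) :: r, spc)

-- B's `while si < end` loop; fuel = its exact trip count end - si
def pvEmitB (sizes : List Int) : Nat → Int → Nat → List Int → List Int × Nat
  | 0, _, si, offsets => (offsets, si)
  | k + 1, offset, si, offsets =>
    pvEmitB sizes k (offset + sizes.getD si 0) (si + 1) (offsets ++ [offset])

-- B's `for offset in chunk_offsets` loop with its `break`
def pvLoopB (sizes : List Int) (n : Nat) :
    List Int → Int → List (Int × Int) → Int → Nat → List Int → List Int
  | [], _, _, _, _, offsets => offsets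
  | offset :: cs, cn, rest, spc, si, offsets =>
    if n ≤ si then offsets
    else
      let cn' := cn + 1
      let a := pvAdvance rest spc cn'
      let endi : Int := min ((si : Int) + a.2) (n : Int)
      let k : Nat := (endi - (si : Int)).toNat
      let st := pvEmitB sizes k offset si offsets
      pvLoopB sizes n cs cn' a.1 a.2 st.2 st.1

def build_sample_offsets_alt (chunk_offsets : List Int) (stsc : List (Int × Int)) (sizes : List Int) : List Int :=
  let bp := (pvDown none stsc.reverse).reverse
  pvLoopB sizes sizes.length chunk_offsets 0 bp 1 0 []

-- ===== PRECONDITION & SPEC =====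
def Spec_build_sample_offsets (chunk_offsets : List Int) (stsc : List (Int × Int)) (sizes : List Int) (out : List Int) : Prop := out = build_sample_offsets_alt chunk_offsets stsc sizes
instance (chunk_offsets : List Int) (stsc : List (Int × Int)) (sizes : List Int) (out : List Int) : Decidable (Spec_build_sample_offsets chunk_offsets stsc sizes out) := by unfold Spec_build_sample_offsets; infer_instance

-- ===== CLAIM (what is proved, stated in full; the proofs are below) =====
def Claim_equal_build_sample_offsets : Prop := ∀ (chunk_offsets : List Int) (stsc : List (Int × Int)) (sizes : List Int), Dom_build_sample_offsets chunk_offsets stsc sizes → Spec_build_sample_offsets chunk_offsets stsc sizes (build_sample_offsets chunk_offsets stsc sizes)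

-- ===== LEMMAS AND PROOFS =====

-- last-match fold with explicit default
def lkD (l : List (Int × Int)) (d c : Int) : Int :=
  l.foldl (fun s e => if e.1 ≤ c then e.2 else s) d

-- first-match scan with explicit default
def fmD : List (Int × Int) → Int → Int → Int
  | [], d, _ => d
  | e :: r, d, c => if e.1 ≤ c then e.2 else fmD r d c

theorem lkD_append (xs ys : List (Int × Int)) (d c : Int) :
    lkD (xs ++ ys) d c = lkD ys (lkD xs d c) c := by
  simp [lkD, List.foldl_append]

theorem fmD_append_singleton (xs : List (Int × Int)) (e : Int × Int) (d c : Int) :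
    fmD (xs ++ [e]) d c = fmD xs (if e.1 ≤ c then e.2 else d) c := by
  induction xs with
  | nil => simp [fmD]
  | cons x xs ih => simp [fmD, ih]

theorem lkD_eq_fmD_reverse (l : List (Int × Int)) (d c : Int) :
    lkD l d c = fmD l.reverse d c := by
  induction l generalizing d with
  | nil => simp [lkD, fmD]
  | cons e r ih =>
    simp only [lkD, List.foldl_cons, List.reverse_cons]
    rw [fmD_append_singleton]
    exact ih _

theorem lkD_no_match (l : List (Int × Int)) (d c : Int) (h : ∀ e ∈ l, c < e.1) :
    lkD l d c = d := by
  induction l generalizing d with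
  | nil => rfl
  | cons e r ih =>
    have he := h e (by simp)
    simp only [lkD, List.foldl_cons, if_neg (by omega : ¬ e.1 ≤ c)]
    exact ih d (fun x hx => h x (by simp [hx]))

theorem lkD_all_match (l : List (Int × Int)) (d c : Int) (h : ∀ e ∈ l, e.1 ≤ c) :
    lkD l d c = (l.map Prod.snd).getLastD d := by
  induction l generalizing d with
  | nil => rfl
  | cons e r ih =>
    have he := h e (by simp)
    simp only [lkD, List.foldl_cons, if_pos he, List.map_cons, List.getLastD_cons]
    exact ih e.2 (fun x hx => h x (by simp [hx]))

theorem getLastD_append (l1 l2 : List Int) (d : Int) :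
    (l1 ++ l2).getLastD d = l2.getLastD (l1.getLastD d) := by
  induction l1 generalizing d with
  | nil => rfl
  | cons a l1 ih => rw [List.cons_append, List.getLastD_cons, List.getLastD_cons, ih]

-- clamp compatibility: for c ≥ 1 the clamped comparison agrees with the raw one
theorem clamp_le_iff (f c : Int) (hc : 1 ≤ c) :
    ((if f ≥ 1 then f else 1) ≤ c) ↔ f ≤ c := by
  split <;> omega

-- dropped entries never hold the first match
theorem fmD_pvDown (ys : List (Int × Int)) (minf : Option Int) (c : Int) (hc : 1 ≤ c)
    (hm : ∀ m, minf = some m → c < m) :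
    fmD (pvDown minf ys) 1 c = fmD ys 1 c := by
  induction ys generalizing minf with
  | nil => rfl
  | cons e r ih =>
    have hclamp := clamp_le_iff e.1 c hc
    match minf, hm with
    | none, _ =>
      simp only [pvDown, fmD]
      by_cases h : (if e.1 ≥ 1 then e.1 else 1) ≤ c
      · rw [if_pos h, if_pos (hclamp.mp h)]
      · rw [if_neg h, if_neg (fun hr => h (hclamp.mpr hr))]
        exact ih _ (by intro m hm'; cases hm'; omega)
    | some m, hm =>
      have hcm : c < m := hm m rfl
      simp only [pvDown]
      by_cases hk : (if e.1 ≥ 1 then e.1 else 1) < m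
      · rw [if_pos hk]
        simp only [fmD]
        by_cases h : (if e.1 ≥ 1 then e.1 else 1) ≤ c
        · rw [if_pos h, if_pos (hclamp.mp h)]
        · rw [if_neg h, if_neg (fun hr => h (hclamp.mpr hr))]
          exact ih _ (by intro m' hm'; cases hm'; omega)
      · rw [if_neg hk]
        have hfc : ¬ e.1 ≤ c := by
          intro hr
          have : (if e.1 ≥ 1 then e.1 else 1) ≤ c := hclamp.mpr hr
          split at this <;> omega
        rw [show fmD (e :: r) 1 c = fmD r 1 c by simp [fmD, if_neg hfc]]
        exact ih _ (by intro m' hm'; cases hm'; omega)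

-- the compressed list is strictly decreasing in its (clamped) first component, all below minf
theorem pvDown_sorted (ys : List (Int × Int)) (minf : Option Int) :
    List.Pairwise (fun a b : Int × Int => b.1 < a.1) (pvDown minf ys) ∧
      (∀ e ∈ pvDown minf ys, ∀ m, minf = some m → e.1 < m) := by
  induction ys generalizing minf with
  | nil => simp [pvDown]
  | cons e r ih =>
    match minf with
    | none =>
      simp only [pvDown]
      obtain ⟨hp, hb⟩ := ih (some (if e.1 ≥ 1 then e.1 else 1))
      refine ⟨List.pairwise_cons.mpr ⟨fun x hx => hb x hx _ rfl, hp⟩, ?_⟩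
      intro x _ m hm; cases hm
    | some m =>
      simp only [pvDown]
      by_cases hk : (if e.1 ≥ 1 then e.1 else 1) < m
      · rw [if_pos hk]
        obtain ⟨hp, hb⟩ := ih (some (if e.1 ≥ 1 then e.1 else 1))
        refine ⟨List.pairwise_cons.mpr ⟨fun x hx => hb x hx _ rfl, hp⟩, ?_⟩
        intro x hx m' hm'; cases hm'
        rcases List.mem_cons.mp hx with h | h
        · subst h; exact hk
        · have := hb x h _ rfl; omega
      · rw [if_neg hk]
        obtain ⟨hp, hb⟩ := ih (some m)
        exact ⟨hp, fun x hx m' hm' => by cases hm'; exact hb x hx _ rfl⟩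

-- the pointer loop consumes exactly the matching prefix of a sorted suffix
theorem pvAdvance_spec (rest : List (Int × Int)) (spc c : Int)
    (hs : List.Pairwise (fun a b : Int × Int => a.1 < b.1) rest) :
    ∃ t, rest = t ++ (pvAdvance rest spc c).1 ∧
      (∀ e ∈ t, e.1 ≤ c) ∧
      (∀ e ∈ (pvAdvance rest spc c).1, c < e.1) ∧
      (pvAdvance rest spc c).2 = (t.map Prod.snd).getLastD spc := by
  induction rest generalizing spc with
  | nil => exact ⟨[], by simp [pvAdvance]⟩
  | cons e r ih =>
    obtain ⟨f, s⟩ := e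
    by_cases h : f ≤ c
    · obtain ⟨t, ht1, ht2, ht3, ht4⟩ := ih s (List.pairwise_cons.mp hs).2
      refine ⟨(f, s) :: t, ?_, ?_, ?_, ?_⟩
      · simp [pvAdvance, if_pos h, ← ht1]
      · intro x hx; rcases List.mem_cons.mp hx with h' | h'
        · subst h'; exact h
        · exact ht2 x h'
      · simpa [pvAdvance, if_pos h] using ht3
      · rw [List.map_cons, List.getLastD_cons, ← ht4]
        simp [pvAdvance, if_pos h]
    · refine ⟨[], by simp [pvAdvance, if_neg h], by simp, ?_, by simp [pvAdvance, if_neg h]⟩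
      intro x hx
      simp only [pvAdvance, if_neg h] at hx
      rcases List.mem_cons.mp hx with h' | h'
      · subst h'; omega
      · have := (List.pairwise_cons.mp hs).1 x h'; omega


-- B's unchecked inner loop advances si by exactly its fuel
theorem pvEmitB_snd (sizes : List Int) (k : Nat) (offset : Int) (si : Nat) (acc : List Int) :
    (pvEmitB sizes k offset si acc).2 = si + k := by
  induction k generalizing offset si acc with
  | zero => rfl
  | succ k ih => simp [pvEmitB, ih]; omega

-- A's bounded inner loop = B's inner loop run for the exact trip count
theorem pvEmitA_eq_pvEmitB (sizes : List Int) (m : Nat) (offset : Int) (si : Nat) (acc : List Int)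
    (h : si ≤ sizes.length) :
    pvEmitA sizes m offset si acc = pvEmitB sizes (min m (sizes.length - si)) offset si acc := by
  induction m generalizing offset si acc with
  | zero => simp [pvEmitA, pvEmitB]
  | succ m ih =>
    by_cases hlt : si < sizes.length
    · have hmin : min (m + 1) (sizes.length - si) = min m (sizes.length - (si + 1)) + 1 := by omega
      rw [hmin]
      simp only [pvEmitA, if_pos hlt, pvEmitB]
      exact ih _ _ _ (by omega)
    · have hmin : min (m + 1) (sizes.length - si) = 0 := by omega
      rw [hmin]
      simp [pvEmitA, if_neg hlt, pvEmitB]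

theorem pvEmitA_done (sizes : List Int) (m : Nat) (offset : Int) (si : Nat) (acc : List Int)
    (h : sizes.length ≤ si) : pvEmitA sizes m offset si acc = (acc, si) := by
  cases m with
  | zero => rfl
  | succ m => simp [pvEmitA, if_neg (by omega : ¬ si < sizes.length)]

theorem foldA_done (co : List Int) (stsc : List (Int × Int)) (sizes : List Int)
    (l : List Nat) (st : List Int × Nat) (h : sizes.length ≤ st.2) :
    l.foldl (pvStepA co stsc sizes) st = st := by
  induction l generalizing st with
  | nil => rfl
  | cons x l ih =>
    have : pvStepA co stsc sizes st x = st := by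
      simp [pvStepA, pvEmitA_done _ _ _ _ _ h]
    rw [List.foldl_cons, this, ih st h]

-- the chain: A's per-chunk rescan = last-match lookup over the compressed breakpoints
theorem pvSpcA_eq_lkD_bp (stsc : List (Int × Int)) (c : Int) (hc : 1 ≤ c) :
    pvSpcA stsc c = lkD ((pvDown none stsc.reverse).reverse) 1 c := by
  have h1 : pvSpcA stsc c = fmD stsc.reverse 1 c := lkD_eq_fmD_reverse stsc 1 c
  have h2 : fmD (pvDown none stsc.reverse) 1 c = fmD stsc.reverse 1 c :=
    fmD_pvDown stsc.reverse none c hc (by intro m h; cases h)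
  have h3 : lkD ((pvDown none stsc.reverse).reverse) 1 c
      = fmD (pvDown none stsc.reverse) 1 c := by
    rw [lkD_eq_fmD_reverse, List.reverse_reverse]
  omega

-- main invariant-carrying induction over the remaining chunks
theorem main_loop (co : List Int) (stsc : List (Int × Int)) (sizes : List Int)
    (cs : List Int) (k si : Nat) (acc : List Int) (done rest : List (Int × Int)) (spc : Int)
    (hdrop : co.drop k = cs)
    (hsi : si ≤ sizes.length)
    (hbp : (pvDown none stsc.reverse).reverse = done ++ rest)
    (hdone : ∀ e ∈ done, e.1 ≤ (k : Int))
    (hspc : spc = (done.map Prod.snd).getLastD 1)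
    (hsort : List.Pairwise (fun a b : Int × Int => a.1 < b.1) ((pvDown none stsc.reverse).reverse)) :
    ((List.range' k cs.length).foldl (pvStepA co stsc sizes) (acc, si)).1
      = pvLoopB sizes sizes.length cs (k : Int) rest spc si acc := by
  induction cs generalizing k si acc done rest spc with
  | nil => simp [pvLoopB]
  | cons offset cs ih =>
    rw [List.length_cons, List.range'_succ, List.foldl_cons]
    by_cases hbreak : sizes.length ≤ si
    · rw [pvLoopB, if_pos hbreak]
      have hstep : pvStepA co stsc sizes (acc, si) k = (acc, si) := by
        simp [pvStepA, pvEmitA_done _ _ _ _ _ hbreak]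
      rw [hstep, foldA_done co stsc sizes _ _ hbreak]
    · -- the chunk offset being processed
      have hget : co.getD k 0 = offset := by
        have h0 : (co.drop k)[0]? = some offset := by rw [hdrop]; rfl
        rw [List.getElem?_drop] at h0
        simp only [Nat.add_zero] at h0
        rw [List.getD_eq_getElem?_getD, h0]
        rfl
      -- sortedness of the current suffix
      have hsort' : List.Pairwise (fun a b : Int × Int => a.1 < b.1) rest := by
        rw [hbp] at hsort
        exact (List.pairwise_append.mp hsort).2.1
      obtain ⟨t, ht1, ht2, ht3, ht4⟩ := pvAdvance_spec rest spc ((k : Int) + 1) hsort'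
      -- the advanced spc is exactly A's rescan value for this chunk
      have hdone' : ∀ e ∈ done ++ t, e.1 ≤ (k : Int) + 1 := by
        intro e he
        rcases List.mem_append.mp he with h | h
        · have := hdone e h; omega
        · exact ht2 e h
      have hspc' : (pvAdvance rest spc ((k : Int) + 1)).2
          = ((done ++ t).map Prod.snd).getLastD 1 := by
        rw [ht4, hspc, List.map_append, getLastD_append]
      have hlk : lkD ((pvDown none stsc.reverse).reverse) 1 ((k : Int) + 1)
          = ((done ++ t).map Prod.snd).getLastD 1 := by
        rw [hbp, ht1, ← List.append_assoc, lkD_append,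
          lkD_all_match _ _ _ hdone', lkD_no_match _ _ _ ht3]
      have hspcA : pvSpcA stsc ((k : Int) + 1) = (pvAdvance rest spc ((k : Int) + 1)).2 := by
        rw [pvSpcA_eq_lkD_bp stsc _ (by omega), hlk, hspc']
      -- inner loops agree
      have hk : ((min ((si : Int) + (pvAdvance rest spc ((k : Int) + 1)).2) (sizes.length : Int))
          - (si : Int)).toNat = min (pvAdvance rest spc ((k : Int) + 1)).2.toNat (sizes.length - si) := by
        omega
      rw [pvLoopB, if_neg hbreak]
      have hstep : pvStepA co stsc sizes (acc, si) k
          = pvEmitB sizes (((min ((si : Int) + (pvAdvance rest spc ((k : Int) + 1)).2) (sizes.length : Int)) - (si : Int)).toNat) offset si acc := by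
        rw [hk]
        simp only [pvStepA, hget, hspcA]
        exact pvEmitA_eq_pvEmitB sizes _ offset si acc hsi
      rw [hstep]
      have hsi' : (pvEmitB sizes (((min ((si : Int) + (pvAdvance rest spc ((k : Int) + 1)).2) (sizes.length : Int)) - (si : Int)).toNat) offset si acc).2 ≤ sizes.length := by
        rw [pvEmitB_snd]; omega
      have hdrop' : co.drop (k + 1) = cs := by
        have : co.drop (k + 1) = (co.drop k).drop 1 := by
          rw [List.drop_drop]
        rw [this, hdrop]; rfl
      have hbp2 : (pvDown none stsc.reverse).reverse
          = (done ++ t) ++ (pvAdvance rest spc ((k : Int) + 1)).1 := by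
        rw [List.append_assoc, ← ht1]; exact hbp
      have ihx := ih (k + 1)
        (pvEmitB sizes (((min ((si : Int) + (pvAdvance rest spc ((k : Int) + 1)).2) (sizes.length : Int)) - (si : Int)).toNat) offset si acc).2
        (pvEmitB sizes (((min ((si : Int) + (pvAdvance rest spc ((k : Int) + 1)).2) (sizes.length : Int)) - (si : Int)).toNat) offset si acc).1
        (done ++ t) (pvAdvance rest spc ((k : Int) + 1)).1 (pvAdvance rest spc ((k : Int) + 1)).2
        hdrop' hsi' hbp2
        (by push_cast; exact hdone') hspc'
      push_cast at ihx ⊢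
      exact ihx

-- ===== VERDICT (by name: the statement is the Claim_ definition above) =====
theorem build_sample_offsets_spec : Claim_equal_build_sample_offsets := by
  intro co stsc sizes _
  unfold Spec_build_sample_offsets build_sample_offsets build_sample_offsets_alt
  have hsort : List.Pairwise (fun a b : Int × Int => a.1 < b.1) ((pvDown none stsc.reverse).reverse) := by
    rw [List.pairwise_reverse]
    exact (pvDown_sorted stsc.reverse none).1
  have := main_loop co stsc sizes co 0 0 [] [] ((pvDown none stsc.reverse).reverse) 1
    (by simp) (by omega) (by simp) (by simp) (by simp) hsort
  rw [List.range_eq_range']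
  simpa using this
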